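-- pv_equiv track=rewrite | github.com/Fauzi41/kriptografi | simple columnar transposition.py | pengurutan
-- ===== SOURCE A (Python) =====
-- def pengurutan(key):
--     data = "ABCDEFGHIJKLMNOPQRSTUVWXYZ"
--     urut_list = list(range(len(key)))
--
--     init = 0
--     for i in range(len(data)):
--         for j in range(len(key)):
--             if data[i] == key[j]:
--                 init += 1
--                 urut_list[j] = init
--
--     return urut_list
-- ===== SOURCE B (Python) =====
-- def pengurutan(key):
--     # per-position rank formula: rank = 1 + (# uppercase letters smaller than c)
--     #                                + (# earlier occurrences of c); non-letters keep their index
--     res = []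
--     for j, c in enumerate(key):
--         if 'A' <= c <= 'Z':
--             smaller = sum(1 for c2 in key if 'A' <= c2 <= 'Z' and c2 < c)
--             ties = key[:j].count(c)
--             res.append(1 + smaller + ties)
--         else:
--             res.append(j)
--     return res
-- ===== Notes on version B (the rewrite author's own statement) =====
-- stated objective: alternative
-- what changed: A mutates a rank list by rescanning the whole key once per alphabet letter (26 bucket passes with a running counter); B computes each position's rank directly by a closed counting formula: 1 + (uppercase letters smaller than the char) + (earlier occurrences of the same char), non-letters keeping their index.
import Mathlib
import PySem

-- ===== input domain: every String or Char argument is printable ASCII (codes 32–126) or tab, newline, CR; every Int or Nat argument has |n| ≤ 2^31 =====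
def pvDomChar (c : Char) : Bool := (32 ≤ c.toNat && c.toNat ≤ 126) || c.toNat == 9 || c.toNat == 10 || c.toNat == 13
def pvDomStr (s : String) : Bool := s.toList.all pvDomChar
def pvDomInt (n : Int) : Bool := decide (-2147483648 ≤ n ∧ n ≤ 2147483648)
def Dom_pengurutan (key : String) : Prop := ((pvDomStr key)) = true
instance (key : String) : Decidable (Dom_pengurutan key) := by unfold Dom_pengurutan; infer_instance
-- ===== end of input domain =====

-- B replaces A's 26 alphabet-bucket rescans of the key by a direct per-position rank formula
-- (1 + uppercase letters smaller than c + earlier occurrences of c); objective: alternative.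

-- ===== PORT A =====
-- the alphabet string A scans
def pvAlpha : List Char := "ABCDEFGHIJKLMNOPQRSTUVWXYZ".toList

-- inner loop 'for j in range(len(key)): if data[i] == key[j]: init += 1; urut_list[j] = init'
-- as recursion over key's chars carrying the index j and the state (init, urut_list)
def pvInner (c : Char) : Nat → List Char → Int × List Int → Int × List Int
  | _, [], st => st
  | j, k :: rest, st =>
      if c = k then pvInner c (j+1) rest (st.1 + 1, st.2.set j (st.1 + 1))
      else pvInner c (j+1) rest st

def pengurutan (key : String) : List Int :=
  (pvAlpha.foldl (fun st c => pvInner c 0 key.toList st)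
    ((0 : Int), PySem.List.pyRange 0 (key.toList.length : Int) 1)).2

-- ===== PORT B =====
-- Source B's rank expression 1 + smaller + ties; key[:j].count(c) is ported via PySem slice (exact)
def pvBval (ks : List Char) (jc : Int × Char) : Int :=
  1 + (ks.countP (fun c2 => decide ('A' ≤ c2) && decide (c2 ≤ 'Z') && decide (c2 < jc.2)) : Int)
    + ((PySem.List.slice ks none (some jc.1)).count jc.2 : Int)

def pengurutan_alt (key : String) : List Int :=
  (PySem.List.enumerate key.toList 0).map
    (fun jc => if 'A' ≤ jc.2 ∧ jc.2 ≤ 'Z' then pvBval key.toList jc else jc.1)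

-- ===== PRECONDITION & SPEC =====
def Spec_pengurutan (key : String) (out : List Int) : Prop := out = pengurutan_alt key
instance (key : String) (out : List Int) : Decidable (Spec_pengurutan key out) := by unfold Spec_pengurutan; infer_instance

-- ===== CLAIM (what is proved, stated in full; the proofs are below) =====
def Claim_equal_pengurutan : Prop := ∀ (key : String), Dom_pengurutan key → Spec_pengurutan key (pengurutan key)

-- ===== LEMMAS AND PROOFS =====

theorem alpha_eq : pvAlpha = ['A','B','C','D','E','F','G','H','I','J','K','L','M','N','O','P','Q','R','S','T','U','V','W','X','Y','Z'] := by decide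

theorem alpha_pairwise : pvAlpha.Pairwise (· < ·) := by decide

theorem mem_alpha (k : Char) : k ∈ pvAlpha ↔ ('A' ≤ k ∧ k ≤ 'Z') := by
  rw [alpha_eq]
  simp only [List.mem_cons, List.not_mem_nil, or_false, Char.le_def, Char.ext_iff,
    UInt32.le_iff_toNat_le, ← UInt32.toNat_inj,
    show ('A':Char).val.toNat = 65 from rfl, show ('B':Char).val.toNat = 66 from rfl, show ('C':Char).val.toNat = 67 from rfl, show ('D':Char).val.toNat = 68 from rfl, show ('E':Char).val.toNat = 69 from rfl, show ('F':Char).val.toNat = 70 from rfl, show ('G':Char).val.toNat = 71 from rfl, show ('H':Char).val.toNat = 72 from rfl, show ('I':Char).val.toNat = 73 from rfl, show ('J':Char).val.toNat = 74 from rfl, show ('K':Char).val.toNat = 75 from rfl, show ('L':Char).val.toNat = 76 from rfl, show ('M':Char).val.toNat = 77 from rfl, show ('N':Char).val.toNat = 78 from rfl, show ('O':Char).val.toNat = 79 from rfl, show ('P':Char).val.toNat = 80 from rfl, show ('Q':Char).val.toNat = 81 from rfl, show ('R':Char).val.toNat = 82 from rfl, show ('S':Char).val.toNat = 83 from rfl,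 show ('T':Char).val.toNat = 84 from rfl, show ('U':Char).val.toNat = 85 from rfl, show ('V':Char).val.toNat = 86 from rfl, show ('W':Char).val.toNat = 87 from rfl, show ('X':Char).val.toNat = 88 from rfl, show ('Y':Char).val.toNat = 89 from rfl, show ('Z':Char).val.toNat = 90 from rfl]
  omega

-- canonical state of A's outer loop after the alphabet prefix p has been processed
def pvCanon (ks p : List Char) : Int × List Int :=
  ((ks.countP (fun k => decide (k ∈ p)) : Int),
   (PySem.List.enumerate ks 0).map (fun jc => if jc.2 ∈ p then pvBval ks jc else jc.1))

theorem prefix_mem (p : List Char) (c : Char) (q : List Char) (h : p ++ c :: q = pvAlpha)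
    (k : Char) : k ∈ p ↔ ('A' ≤ k ∧ k ≤ 'Z' ∧ k < c) := by
  have hpw := alpha_pairwise
  rw [← h, List.pairwise_append] at hpw
  constructor
  · intro hk
    have hka : k ∈ pvAlpha := by rw [← h]; exact List.mem_append.2 (Or.inl hk)
    have hu := (mem_alpha k).1 hka
    exact ⟨hu.1, hu.2, hpw.2.2 k hk c (List.mem_cons_self ..)⟩
  · rintro ⟨h1, h2, h3⟩
    have hka : k ∈ pvAlpha := (mem_alpha k).2 ⟨h1, h2⟩
    rw [← h] at hka
    rcases List.mem_append.1 hka with hk | hk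
    · exact hk
    · rcases List.mem_cons.1 hk with rfl | hk
      · exact absurd h3 (lt_irrefl k)
      · exact absurd h3 (not_lt_of_gt ((List.pairwise_cons.1 hpw.2.1).1 k hk))

theorem inner_fst (c : Char) : ∀ (rest : List Char) (j : Nat) (st : Int × List Int),
    (pvInner c j rest st).1 = st.1 + (rest.countP (fun k => decide (c = k)) : Int) := by
  intro rest
  induction rest with
  | nil => intro j st; simp [pvInner]
  | cons k rest ih =>
    intro j st
    by_cases hck : c = k
    · subst hck
      simp [pvInner, ih]
      omega
    · simp [pvInner, hck, ih]

theorem inner_get (c : Char) : ∀ (rest : List Char) (j : Nat) (init : Int) (lst : List Int),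
    lst.length = j + rest.length → ∀ m : Nat,
    (pvInner c j rest (init, lst)).2[m]? =
      if j ≤ m ∧ m - j < rest.length ∧ rest[m - j]? = some c
      then some (init + 1 + (((rest.take (m - j)).countP (fun k => decide (c = k))) : Int))
      else lst[m]? := by
  intro rest
  induction rest with
  | nil =>
    intro j init lst hlen m
    rw [pvInner, if_neg]
    rintro ⟨-, h, -⟩
    simp at h
  | cons k rest ih =>
    intro j init lst hlen m
    simp only [List.length_cons] at hlen
    by_cases hck : c = k
    · subst hck
      rw [pvInner, if_pos rfl]
      rw [ih (j+1) (init+1) (lst.set j (init+1)) (by simp [hlen]; omega) m]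
      rcases lt_trichotomy m j with hmj | rfl | hmj
      · rw [if_neg (by omega), if_neg (by omega), List.getElem?_set_ne (by omega)]
      · rw [if_neg (by omega), if_pos ⟨le_refl m, by simp, by simp⟩]
        simp only [Nat.sub_self, List.take_zero, List.countP_nil]
        rw [List.getElem?_set_self (by omega)]
        norm_num
      · have hd : m - j = (m - (j+1)) + 1 := by omega
        rw [List.getElem?_set_ne (by omega)]
        by_cases hcond : (j+1 ≤ m ∧ m - (j+1) < rest.length ∧ rest[m - (j+1)]? = some c)
        · rw [if_pos hcond, if_pos ⟨by omega, by simp [hd]; omega, by simp [hd]; exact hcond.2.2⟩]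
          rw [hd]
          simp only [List.take_succ_cons, List.countP_cons, decide_eq_true_eq]
          simp
          ring
        · rw [if_neg hcond, if_neg]
          rintro ⟨h1, h2, h3⟩
          rw [hd] at h2 h3
          simp at h2 h3
          exact hcond ⟨by omega, by omega, by simpa using h3⟩
    · rw [pvInner, if_neg hck]
      rw [ih (j+1) init lst (by omega) m]
      rcases lt_trichotomy m j with hmj | rfl | hmj
      · rw [if_neg (by omega), if_neg (by omega)]
      · rw [if_neg (by omega), if_neg]
        rintro ⟨-, -, h3⟩
        simp only [Nat.sub_self] at h3
        simp at h3
        exact hck h3.symm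
      · have hd : m - j = (m - (j+1)) + 1 := by omega
        by_cases hcond : (j+1 ≤ m ∧ m - (j+1) < rest.length ∧ rest[m - (j+1)]? = some c)
        · rw [if_pos hcond, if_pos ⟨by omega, by simp [hd]; omega, by simp [hd]; exact hcond.2.2⟩]
          rw [hd]
          simp only [List.take_succ_cons, List.countP_cons]
          have hkk : decide (c = k) = false := by simp [hck]
          simp [hkk]
        · rw [if_neg hcond, if_neg]
          rintro ⟨h1, h2, h3⟩
          rw [hd] at h2 h3
          simp at h2 h3
          exact hcond ⟨by omega, by omega, by simpa using h3⟩

theorem countP_snoc_mem (l p : List Char) (c : Char) (hc : c ∉ p) :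
    l.countP (fun k => decide (k ∈ p ++ [c]))
      = l.countP (fun k => decide (k ∈ p)) + l.countP (fun k => decide (c = k)) := by
  induction l with
  | nil => simp
  | cons a l ih =>
    simp only [List.countP_cons, ih]
    by_cases h1 : a ∈ p <;> by_cases h2 : c = a <;>
      simp [List.mem_append, h1, h2, eq_comm] at * <;> omega

theorem canon_get (ks p : List Char) (m : Nat) :
    ((PySem.List.enumerate ks 0).map (fun jc => if jc.2 ∈ p then pvBval ks jc else jc.1))[m]? =
      ks[m]?.map (fun x => if x ∈ p then pvBval ks ((m : Int), x) else (m : Int)) := by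
  simp only [List.getElem?_map, PySem.List.getElem?_enumerate, Option.map_map]
  cases ks[m]? <;> simp

theorem count_eq_countP' (l : List Char) (c : Char) :
    l.count c = l.countP (fun k => decide (c = k)) := by
  induction l with
  | nil => rfl
  | cons a l ih =>
    simp only [List.count_cons, List.countP_cons, beq_iff_eq, decide_eq_true_eq]
    by_cases h : a = c
    · subst h; simp [ih]
    · simp only [ih, if_neg h, if_neg (fun hh => h (Eq.symm hh))]

theorem step_canon (ks p : List Char) (c : Char) (q : List Char)
    (h : p ++ c :: q = pvAlpha) :
    pvInner c 0 ks (pvCanon ks p) = pvCanon ks (p ++ [c]) := by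
  have hmem := prefix_mem p c q h
  have hcp : c ∉ p := fun hx => absurd ((hmem c).1 hx).2.2 (lt_irrefl c)
  have hcnt : ks.countP (fun k => decide (k ∈ p))
      = ks.countP (fun c2 => decide ('A' ≤ c2) && decide (c2 ≤ 'Z') && decide (c2 < c)) := by
    apply List.countP_congr
    intro a _
    by_cases ha : a ∈ p
    · have := (hmem a).1 ha
      simp [ha, this.1, this.2.1, this.2.2]
    · have hna : ¬ ('A' ≤ a ∧ a ≤ 'Z' ∧ a < c) := fun hx => ha ((hmem a).2 hx)
      simp only [ha, decide_false]
      by_cases h1 : 'A' ≤ a <;> by_cases h2 : a ≤ 'Z' <;> by_cases h3 : a < c <;>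
        simp [h1, h2, h3] at hna ⊢
  unfold pvCanon
  apply Prod.ext
  · rw [inner_fst]
    show ((ks.countP (fun k => decide (k ∈ p)) : Nat) : Int) + _
        = ((ks.countP (fun k => decide (k ∈ p ++ [c])) : Nat) : Int)
    rw [countP_snoc_mem ks p c hcp]; push_cast; ring
  · apply List.ext_getElem?
    intro m
    rw [inner_get c ks 0 _ _ (by simp [PySem.List.length_enumerate]) m]
    rw [canon_get ks p m, canon_get ks (p ++ [c]) m]
    by_cases hm : m < ks.length
    · have hks : ks[m]? = some (ks[m]) := List.getElem?_eq_getElem hm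
      by_cases hkc : ks[m] = c
      · rw [if_pos ⟨Nat.zero_le m, by simpa using hm, by simpa [hks] using hkc⟩]
        rw [hks]
        simp only [Option.map_some]
        rw [if_pos (by rw [hkc]; exact List.mem_append.2 (Or.inr (List.mem_singleton.2 rfl)))]
        rw [hkc]
        congr 1
        simp only [pvBval]
        rw [PySem.List.slice_to]
        · simp only [Int.toNat_natCast, Nat.sub_zero]
          rw [hcnt, ← count_eq_countP']
          ring
        · positivity
      · rw [if_neg (by rintro ⟨-, -, h3⟩; rw [Nat.sub_zero, hks] at h3; exact hkc (Option.some.inj h3))]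
        rw [hks]
        simp only [Option.map_some]
        congr 1
        apply if_congr _ rfl rfl
        rw [List.mem_append, List.mem_singleton]
        constructor
        · exact Or.inl
        · rintro (h1 | h1)
          · exact h1
          · exact absurd h1 hkc
    · have hks : ks[m]? = none := List.getElem?_eq_none (by omega)
      rw [if_neg (by rintro ⟨-, h2, -⟩; omega), hks]
      rfl

theorem fold_canon (ks : List Char) : ∀ (q p : List Char), p ++ q = pvAlpha →
    q.foldl (fun st c => pvInner c 0 ks st) (pvCanon ks p) = pvCanon ks (p ++ q) := by
  intro q
  induction q with
  | nil => intro p hp; simp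
  | cons c q ih =>
    intro p hp
    rw [List.foldl_cons, step_canon ks p c q hp, ih (p ++ [c]) (by simpa using hp)]
    simp

theorem canon_nil (ks : List Char) :
    pvCanon ks [] = ((0 : Int), PySem.List.pyRange 0 (ks.length : Int) 1) := by
  simp [pvCanon, PySem.List.map_fst_enumerate]

-- ===== VERDICT (by name: the statement is the Claim_ definition above) =====
theorem pengurutan_spec : Claim_equal_pengurutan := by
  intro key _
  show pengurutan key = pengurutan_alt key
  unfold pengurutan pengurutan_alt
  have h := fold_canon key.toList pvAlpha [] (by simp)
  rw [canon_nil] at h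
  rw [h]
  apply List.map_congr_left
  intro jc _
  exact if_congr (mem_alpha jc.2) rfl rfl
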